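-- pv_equiv track=rewrite | github.com/Evelyn-0/LMFDB_EC_Lookup | LMFDB_Lookup.py | magmaize
-- ===== SOURCE A (Python) =====
-- def magmaize(line):
--     '''This is a helper function to make a regular nested list into a magma list'''
--     new_list = ''
--     for n in line:
--         if n == '[':
--             new_list = new_list + n + '*'
--         elif n == ']':
--             new_list = new_list + '*' + n
--         else:
--             new_list = new_list + n
--     return new_list
-- ===== SOURCE B (Python) =====
-- def magmaize(line):
--     '''This is a helper function to make a regular nested list into a magma list'''
--     return line.replace('[', '[*').replace(']', '*]')
-- ===== Notes on version B (the rewrite author's own statement) =====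
-- stated objective: idiomatic
-- what changed: Replaces A's manual per-character accumulation loop with three branches by two whole-string str.replace substitution passes, one per bracket kind; the first pass never introduces a closing bracket, so the passes are independent.
import Mathlib
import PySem

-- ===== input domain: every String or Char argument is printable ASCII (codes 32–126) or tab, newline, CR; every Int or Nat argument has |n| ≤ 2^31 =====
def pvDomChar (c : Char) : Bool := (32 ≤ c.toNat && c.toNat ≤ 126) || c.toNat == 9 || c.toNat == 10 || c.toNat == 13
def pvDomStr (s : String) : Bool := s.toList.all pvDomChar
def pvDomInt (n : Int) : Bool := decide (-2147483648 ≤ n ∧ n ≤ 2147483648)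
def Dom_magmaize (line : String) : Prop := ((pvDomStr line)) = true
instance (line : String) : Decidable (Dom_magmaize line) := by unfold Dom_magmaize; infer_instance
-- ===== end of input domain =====

-- B replaces A's per-character accumulation loop by two whole-string replace passes.

-- ===== PORT A =====
-- literal port of A's loop: accumulate new_list character by character
def magmaize (line : String) : String :=
  String.ofList (line.toList.foldl
    (fun new_list n =>
      if n = '[' then new_list ++ [n] ++ ['*']
      else if n = ']' then new_list ++ ['*'] ++ [n]
      else new_list ++ [n]) [])

-- ===== PORT B =====
def magmaize_alt (line : String) : String :=
  PySem.Str.replace (PySem.Str.replace line "[" "[*") "]" "*]"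

-- ===== PRECONDITION & SPEC =====
def Spec_magmaize (line : String) (out : String) : Prop := out = magmaize_alt line
instance (line : String) (out : String) : Decidable (Spec_magmaize line out) := by unfold Spec_magmaize; infer_instance

-- ===== CLAIM (what is proved, stated in full; the proofs are below) =====
def Claim_equal_magmaize : Prop := ∀ (line : String), Dom_magmaize line → Spec_magmaize line (magmaize line)

-- ===== LEMMAS AND PROOFS =====

-- the per-character expansion both programs realise
def pvG (c : Char) : List Char :=
  if c = '[' then ['[', '*'] else if c = ']' then ['*', ']'] else [c]

theorem pvFoldl_eq_flatMap (l acc : List Char) :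
    l.foldl (fun new_list n =>
      if n = '[' then new_list ++ [n] ++ ['*']
      else if n = ']' then new_list ++ ['*'] ++ [n]
      else new_list ++ [n]) acc = acc ++ l.flatMap pvG := by
  induction l generalizing acc with
  | nil => simp
  | cons c t ih =>
    simp only [List.foldl_cons, List.flatMap_cons, ih, pvG]
    split_ifs <;> simp_all

theorem pvReplaceGo_single (o : Char) (new : List Char) :
    ∀ (fuel : Nat) (l acc : List Char), l.length ≤ fuel →
    PySem.Chars.replace.go [o] new fuel l acc
      = acc.reverse ++ l.flatMap (fun c => if c = o then new else [c]) := by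
  intro fuel
  induction fuel with
  | zero =>
    intro l acc h
    have : l = [] := List.eq_nil_of_length_eq_zero (Nat.le_zero.mp h)
    subst this
    simp [PySem.Chars.replace.go]
  | succ n ih =>
    intro l acc h
    cases l with
    | nil => simp [PySem.Chars.replace.go]
    | cons c t =>
      rw [PySem.Chars.replace.go]
      by_cases hc : c = o
      · subst hc
        have hpre : List.isPrefixOf [c] (c :: t) = true := by
          simp [List.isPrefixOf]
        simp only [hpre, if_pos]
        rw [ih]
        · simp
        · simpa using Nat.le_of_succ_le_succ h
      · have hpre : List.isPrefixOf [o] (c :: t) = false := by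
          simp [List.isPrefixOf]
          exact fun he => absurd he.symm hc
        simp only [hpre]
        rw [if_neg (by simp)]
        rw [ih t (c :: acc) (by simpa using Nat.le_of_succ_le_succ h)]
        simp [hc]

theorem pvReplace_single (o : Char) (new cs : List Char) :
    PySem.Chars.replace cs [o] new
      = cs.flatMap (fun c => if c = o then new else [c]) := by
  rw [PySem.Chars.replace]
  simp only [List.isEmpty_cons, Bool.false_eq_true, if_false]
  rw [pvReplaceGo_single o new cs.length cs [] (le_refl _)]
  simp

theorem pvAltToList (line : String) :
    (magmaize_alt line).toList = line.toList.flatMap pvG := by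
  unfold magmaize_alt
  rw [PySem.Str.toList_replace, PySem.Str.toList_replace]
  show PySem.Chars.replace (PySem.Chars.replace line.toList ['['] ['[', '*']) [']'] ['*', ']']
      = _
  rw [pvReplace_single, pvReplace_single, List.flatMap_assoc]
  apply List.flatMap_congr
  intro c _
  unfold pvG
  by_cases h1 : c = '['
  · subst h1; decide
  · by_cases h2 : c = ']'
    · subst h2; decide
    · simp [h1, h2]

-- ===== VERDICT (by name: the statement is the Claim_ definition above) =====
theorem magmaize_spec : Claim_equal_magmaize := by
  intro line _
  unfold Spec_magmaize magmaize
  rw [pvFoldl_eq_flatMap]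
  have h := pvAltToList line
  apply String.toList_injective
  rw [h]
  exact String.toList_ofList
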